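-- pv_equiv track=rewrite | github.com/mmistroni/Codility | src/problem2.py | solution
-- ===== SOURCE A (Python) =====
-- import copy
--
-- def compute_all_locs(input_arr, n_locs):
--     days = 0
--     for item in input_arr:
--         days +=1
--         if item in n_locs:
--             n_locs.remove(item)
--         if not n_locs:
--             break
--     return days
--
-- def solution(A):
--     unique_locs = set(A)
--     holder = []
--     for idx in range(0, len(A)):
--         copied = copy.copy(unique_locs)
--         subset = A[idx:]
--         if len(subset) < len(copied):
--             break
--         res = compute_all_locs(subset, copied)
--         holder.append(res)
--     return min(holder)
-- ===== SOURCE B (Python) =====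
-- def solution(A):
--     return len(set(A))
-- ===== Notes on version B (the rewrite author's own statement) =====
-- stated objective: faster
-- what changed: The minimum over all start offsets always equals the number of distinct elements (the last surviving offset leaves a window of exactly that length), so B returns len(set(A)) in one pass instead of A's quadratic scan over all suffixes.
-- crash fix: On the empty list A raises ValueError (min() of an empty holder) while B returns 0. — e.g. on solution([]): A raises ValueError, B returns 0
import Mathlib
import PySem

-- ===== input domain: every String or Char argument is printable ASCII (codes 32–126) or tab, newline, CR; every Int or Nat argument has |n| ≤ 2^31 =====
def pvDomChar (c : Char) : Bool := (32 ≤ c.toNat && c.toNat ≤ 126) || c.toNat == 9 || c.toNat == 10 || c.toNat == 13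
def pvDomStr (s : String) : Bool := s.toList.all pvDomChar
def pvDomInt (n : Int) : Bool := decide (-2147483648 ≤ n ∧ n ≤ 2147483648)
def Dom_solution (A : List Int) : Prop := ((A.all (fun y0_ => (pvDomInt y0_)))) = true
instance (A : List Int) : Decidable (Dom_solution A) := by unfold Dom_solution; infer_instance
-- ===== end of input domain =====

-- B replaces A's quadratic scan over every suffix by the closed form len(set(A));
-- proof: A's minimum over start offsets always equals the number of distinct elements.

-- ===== PORT A =====
-- port of compute_all_locs: days accumulator, early break when the set empties
def computeAllLocs : List Int → PySem.Set Int → Int → Int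
  | [], _, days => days
  | item :: rest, nLocs, days =>
    let days' := days + 1
    let nLocs' := if PySem.Set.contains nLocs item
                  then (PySem.Set.remove? nLocs item).getD nLocs else nLocs
    if nLocs' = [] then days' else computeAllLocs rest nLocs' days'

-- the for-idx loop of solution, with its break when the suffix is shorter than the set
def solutionLoop (A : List Int) (u : PySem.Set Int) : List Int → List Int → List Int
  | [], holder => holder
  | idx :: rest, holder =>
    let subset := PySem.List.slice A (some idx) none
    if subset.length < u.length then holder
    else solutionLoop A u rest (holder ++ [computeAllLocs subset u 0])

def solution (A : List Int) : Int :=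
  -- unique_locs = set(A); holder from the idx loop; min(holder) (Pre_ excludes the empty holder)
  (PySem.List.min? (solutionLoop A (PySem.Set.ofList A) (PySem.List.pyRange 0 (A.length : Int) 1) [])
    (fun x => x)).getD 0

-- ===== PORT B =====
def solution_alt (A : List Int) : Int := ((PySem.Set.ofList A).length : Int)

-- ===== PRECONDITION & SPEC =====
-- A raises ValueError (min of an empty list) exactly on the empty list.
def Pre_solution (A : List Int) : Prop := A ≠ []
instance (A : List Int) : Decidable (Pre_solution A) := by unfold Pre_solution; infer_instance
def pvWitness_solution : List Int := ([1, 2, 1])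

-- On the empty list A raises ValueError (min() of the empty holder) while B returns 0.
def Raises_solution (A : List Int) : Prop := A = []
instance (A : List Int) : Decidable (Raises_solution A) := by unfold Raises_solution; infer_instance
def pvRaiseWitness_solution : List Int := ([])
def pvRaiseWitnessOut_solution : Int := 0

def Spec_solution (A : List Int) (out : Int) : Prop := out = solution_alt A
instance (A : List Int) (out : Int) : Decidable (Spec_solution A out) := by unfold Spec_solution; infer_instance

-- ===== CLAIM (what is proved, stated in full; the proofs are below) =====
def Claim_equal_solution : Prop := ∀ (A : List Int), Dom_solution A → Pre_solution A → Spec_solution A (solution A)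
def Claim_raises_solution : Prop := (∀ (A : List Int), Dom_solution A → Raises_solution A → ¬ Pre_solution A) ∧ (Dom_solution (pvRaiseWitness_solution) ∧ Raises_solution (pvRaiseWitness_solution) ∧ solution_alt (pvRaiseWitness_solution) = pvRaiseWitnessOut_solution)

-- ===== LEMMAS AND PROOFS =====

-- one loop iteration of compute_all_locs shrinks the set by at most one element and keeps it duplicate-free
theorem remove_step (u : PySem.Set Int) (hu : u.Nodup) (x : Int) :
    u.length ≤ (if PySem.Set.contains u x then (PySem.Set.remove? u x).getD u else u).length + 1 ∧
    (if PySem.Set.contains u x then (PySem.Set.remove? u x).getD u else u).Nodup := by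
  by_cases h : PySem.Set.contains u x
  · have hm : x ∈ u := (PySem.Set.contains_iff u x).1 h
    rw [if_pos h, PySem.Set.remove?_of_mem hm]
    have hfe : PySem.Set.discard u x = u.erase x := by
      have h0 : PySem.Set.discard u x = u.filter (fun y => y != x) := rfl
      rw [h0, List.Nodup.erase_eq_filter hu]
    refine ⟨?_, ?_⟩
    · simp only [Option.getD_some, hfe, List.length_erase_of_mem hm]
      have := List.length_pos_of_mem hm
      omega
    · simpa using PySem.Set.nodup_discard u x hu
  · rw [if_neg h]
    exact ⟨by omega, hu⟩

theorem computeAllLocs_le (s : List Int) : ∀ (u : PySem.Set Int) (d : Int),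
    computeAllLocs s u d ≤ d + s.length := by
  induction s with
  | nil => intro u d; simp [computeAllLocs]
  | cons x rest ih =>
    intro u d
    simp only [computeAllLocs]
    set u' := (if PySem.Set.contains u x then (PySem.Set.remove? u x).getD u else u) with hu'
    by_cases hemp : u' = []
    · rw [if_pos hemp]; simp
    · rw [if_neg hemp]
      have := ih u' (d + 1)
      simp only [List.length_cons]
      push_cast at this ⊢
      omega

theorem computeAllLocs_ge (s : List Int) : ∀ (u : PySem.Set Int), u.Nodup → ∀ (d : Int),
    d + min u.length s.length ≤ computeAllLocs s u d := by
  induction s with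
  | nil => intro u _ d; simp [computeAllLocs]
  | cons x rest ih =>
    intro u hu d
    simp only [computeAllLocs]
    have hstep := remove_step u hu x
    set u' := (if PySem.Set.contains u x then (PySem.Set.remove? u x).getD u else u) with hu'
    by_cases hemp : u' = []
    · rw [if_pos hemp]
      have : u'.length = 0 := by rw [hemp]; rfl
      simp only [List.length_cons]
      omega
    · rw [if_neg hemp]
      have := ih u' hstep.2 (d + 1)
      simp only [List.length_cons] at this ⊢
      omega

-- at a suffix of length exactly u.length, the loop body returns exactly u.length
theorem computeAllLocs_exact (s : List Int) (u : PySem.Set Int) (hu : u.Nodup)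
    (hlen : u.length = s.length) : computeAllLocs s u 0 = (s.length : Int) := by
  have h1 := computeAllLocs_le s u 0
  have h2 := computeAllLocs_ge s u hu 0
  rw [hlen] at h2
  simp at h1 h2
  omega

-- the main loop invariant: starting at a valid offset i with u.length ≤ n - i,
-- the loop appends a block l with every element ≥ u.length and containing u.length itself
theorem solutionLoop_spec (A : List Int) (u : PySem.Set Int) (hu : u.Nodup) (hk : 1 ≤ u.length) :
    ∀ (m : Nat) (i : Nat), i + m = A.length → u.length + i ≤ A.length →
    ∀ (holder : List Int),
    ∃ l, solutionLoop A u (PySem.List.pyRange (i : Int) (A.length : Int) 1) holder = holder ++ l ∧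
      (∀ r ∈ l, (u.length : Int) ≤ r) ∧ (u.length : Int) ∈ l := by
  intro m
  induction m with
  | zero => intro i h1 h2 holder; exfalso; omega
  | succ m ih =>
    intro i h1 h2 holder
    have hiA : (i : Int) < (A.length : Int) := by exact_mod_cast (by omega : i < A.length)
    rw [PySem.List.pyRange_one_cons hiA]
    simp only [solutionLoop]
    have hslice : PySem.List.slice A (some (i : Int)) none = A.drop i :=
      PySem.List.slice_from_natCast A i
    have hsublen : (PySem.List.slice A (some (i : Int)) none).length = A.length - i := by
      rw [hslice, List.length_drop]
    rw [if_neg (by omega)]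
    set r := computeAllLocs (PySem.List.slice A (some (i : Int)) none) u 0 with hr
    have hrge : (u.length : Int) ≤ r := by
      have hmin := computeAllLocs_ge (PySem.List.slice A (some (i : Int)) none) u hu 0
      have heq : min u.length (PySem.List.slice A (some (i : Int)) none).length = u.length := by
        omega
      rw [heq] at hmin
      omega
    by_cases hlast : u.length + i = A.length
    · -- last processed offset: r = u.length exactly, and the loop then stops
      have hreq : r = (u.length : Int) := by
        have he := computeAllLocs_exact (PySem.List.slice A (some (i : Int)) none) u hu (by omega)
        rw [← hr] at he
        rw [he, hsublen]; congr 1; omega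
      refine ⟨[r], ?_, by simpa using hrge, by simp [hreq]⟩
      -- remaining range: either empty or its first guard fires, leaving holder ++ [r]
      by_cases hend : i + 1 < A.length
      · have hi1 : ((i : Int) + 1) < (A.length : Int) := by
          exact_mod_cast (by omega : i + 1 < A.length)
        rw [PySem.List.pyRange_one_cons hi1]
        simp only [solutionLoop]
        have hc : ((i : Int) + 1) = ((i + 1 : Nat) : Int) := by push_cast; ring
        rw [hc, PySem.List.slice_from_natCast A (i + 1), List.length_drop]
        rw [if_pos (by omega)]
      · have hnil : PySem.List.pyRange ((i : Int) + 1) (A.length : Int) 1 = [] := by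
          apply PySem.List.pyRange_one_eq_nil
          omega
        rw [hnil]; simp [solutionLoop]
    · -- middle offset: recurse at i + 1
      have hc : ((i : Int) + 1) = ((i + 1 : Nat) : Int) := by push_cast; ring
      rw [hc]
      obtain ⟨l, hl, hge, hmem⟩ := ih (i + 1) (by omega) (by omega) (holder ++ [r])
      refine ⟨r :: l, by rw [hl]; simp, ?_, List.mem_cons.2 (Or.inr hmem)⟩
      intro x hx
      rcases List.mem_cons.1 hx with rfl | hx'
      · exact hrge
      · exact hge x hx'

theorem min_of_bounds (l : List Int) (k : Int) (hge : ∀ r ∈ l, k ≤ r) (hmem : k ∈ l) :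
    (PySem.List.min? l (fun x => x)).getD 0 = k := by
  obtain ⟨m, hm⟩ : ∃ m, PySem.List.min? l (fun x => x) = some m := by
    cases h : PySem.List.min? l (fun x => x) with
    | none => rw [PySem.List.min?_eq_none_iff] at h; subst h; simp at hmem
    | some m => exact ⟨m, rfl⟩
  rw [hm]
  have h1 : m ∈ l := PySem.List.min?_mem hm
  have h2 := PySem.List.min?_isMin hm k hmem
  have h3 := hge m h1
  simp only [Option.getD_some]
  omega

-- ===== VERDICT (by name: the statement is the Claim_ definition above) =====
theorem solution_spec : Claim_equal_solution := by
  intro A _ hA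
  unfold Spec_solution solution solution_alt
  have hnd : (PySem.Set.ofList A).Nodup := PySem.Set.nodup_ofList A
  have hk : 1 ≤ (PySem.Set.ofList A).length := by
    match A, hA with
    | x :: rest, _ =>
      have hx : x ∈ PySem.Set.ofList (x :: rest) :=
        (PySem.Set.mem_ofList (x :: rest) x).2 (by simp)
      exact List.length_pos_of_mem hx
  have hkn : (PySem.Set.ofList A).length ≤ A.length := PySem.Set.length_ofList_le A
  obtain ⟨l, hl, hge, hmem⟩ :=
    solutionLoop_spec A (PySem.Set.ofList A) hnd hk A.length 0 (by omega) (by omega) []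
  simp only [Nat.cast_zero] at hl
  rw [hl]
  simp only [List.nil_append]
  exact min_of_bounds l ((PySem.Set.ofList A).length : Int) hge hmem

@[simp] theorem solution_raises : Claim_raises_solution := by
  unfold Claim_raises_solution
  exact ⟨by intro A _ h hp; exact hp h, by decide⟩
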